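-- pv_equiv track=rewrite | github.com/HydrologicEngineeringCenter/cwms-cli | cwmscli/usgs/rating_ini_file_import.py | parse_ini_line
-- ===== SOURCE A (Python) =====
-- def parse_ini_line(line):
--     """
--     Parses a line in the ini_file into fields
--     """
--     if line.find("'") > 0 or line.find('"') > 0:
--         # ---------------------------#
--         # fields with spaces quoted #
--         # ---------------------------#
--         c1 = [c for c in line]
--         escape = False
--         quote = None
--         c2 = []
--         for c in c1:
--             if c == "\\":
--                 escape = not escape
--                 if not escape:
--                     c2.append(c)
--                 continue
--             if c in ('"', "'"):
--                 if not quote: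
--                     quote = c
--                     continue
--                 if c == quote:
--                     quote = None
--                     continue
--             if c.isspace() and quote:
--                 c = chr(0)
--             c2.append(c)
--         fields = "".join(c2).split()
--         for i in range(len(fields)):
--             fields[i] = fields[i].replace(chr(0), " ")
--     elif line.find("\t") > 0:
--         # ------------------------------------------------------------#
--         # all fields without spaces separated by tabs (version < 5.0 #
--         # ------------------------------------------------------------#
--         fields = line.split("\t")
--     else:
--         # -----------------------#
--         # no fields with spaces #
--         # -----------------------#
--         fields = line.split()
--     return fields
-- ===== SOURCE B (Python) =====
-- def parse_ini_line(line):
--     """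
--     Parses a line in the ini_file into fields (single-pass tokenizer
--     instead of sentinel substitution + str.split).
--     """
--     if line.find("'") > 0 or line.find('"') > 0:
--         fields = []
--         tok = []
--         quote = None
--         escape = False
--         for c in line:
--             if c == "\\":
--                 escape = not escape
--                 if not escape:
--                     tok.append(c)
--             elif c in ('"', "'") and (quote is None or quote == c):
--                 quote = None if quote == c else c
--             elif c.isspace() and quote is None:
--                 if tok:
--                     fields.append("".join(tok))
--                     tok = []
--             else:
--                 tok.append(" " if quote and c.isspace() else c)
--         if tok:
--             fields.append("".join(tok))
--         return fields
--     if line.find("\t") > 0: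
--         return line.split("\t")
--     return line.split()
-- ===== Notes on version B (the rewrite author's own statement) =====
-- stated objective: alternative
-- what changed: The quoted branch's sentinel-substitution (chr(0)) + str.split + per-field replace pipeline is replaced by a direct single-pass tokenizer that flushes tokens at unquoted whitespace, keeping the same quote/escape state machine.
import Mathlib
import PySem

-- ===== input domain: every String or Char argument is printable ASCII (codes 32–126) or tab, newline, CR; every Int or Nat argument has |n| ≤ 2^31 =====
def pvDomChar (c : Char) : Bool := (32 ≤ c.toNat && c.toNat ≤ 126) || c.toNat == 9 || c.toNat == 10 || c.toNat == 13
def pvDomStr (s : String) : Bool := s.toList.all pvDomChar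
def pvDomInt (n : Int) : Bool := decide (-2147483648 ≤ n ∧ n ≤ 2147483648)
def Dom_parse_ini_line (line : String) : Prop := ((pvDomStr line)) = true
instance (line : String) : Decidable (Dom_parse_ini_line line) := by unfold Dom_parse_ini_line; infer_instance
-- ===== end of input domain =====

-- B replaces A's chr(0)-sentinel + split + replace pipeline in the quoted branch by a
-- direct single-pass tokenizer over the same quote/escape state machine (alternative decomposition).

-- ===== PORT A =====
-- step of A's character loop: state (escape, quote, c2), c2 built by appends
def pvStepA (st : Bool × Option Char × List Char) (c : Char) : Bool × Option Char × List Char :=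
  let (escape, quote, c2) := st
  if c = '\\' then
    if escape then (false, quote, c2 ++ [c]) else (true, quote, c2)
  else if (c = '"' ∨ c = '\'') ∧ quote = none then
    (escape, some c, c2)
  else if (c = '"' ∨ c = '\'') ∧ quote = some c then
    (escape, none, c2)
  else
    (escape, quote, c2 ++ [if PySem.Chars.isspace c ∧ quote.isSome then Char.ofNat 0 else c])

def parse_ini_line (line : String) : List String :=
  if PySem.Str.find line "'" > 0 ∨ PySem.Str.find line "\"" > 0 then
    let st := line.toList.foldl pvStepA (false, none, [])
    let c2 := st.2.2
    let fields := PySem.Chars.split₀ c2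
    (fields.map (fun f => PySem.Chars.replace f [Char.ofNat 0] [' '])).map String.mk
  else if PySem.Str.find line "\t" > 0 then
    (PySem.Str.split? line "\t").getD []
  else
    PySem.Str.split₀ line

-- ===== PORT B =====
-- step of B's tokenizer: state (fields, tok, quote, escape)
def pvStepB (st : List (List Char) × List Char × Option Char × Bool) (c : Char) :
    List (List Char) × List Char × Option Char × Bool :=
  let (fields, tok, quote, escape) := st
  if c = '\\' then
    if escape then (fields, tok ++ [c], quote, false) else (fields, tok, quote, true)
  else if (c = '"' ∨ c = '\'') ∧ (quote = none ∨ quote = some c) then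
    (fields, tok, if quote = some c then none else some c, escape)
  else if PySem.Chars.isspace c ∧ quote = none then
    (if tok ≠ [] then fields ++ [tok] else fields, [], quote, escape)
  else
    (fields, tok ++ [if quote.isSome ∧ PySem.Chars.isspace c then ' ' else c], quote, escape)

def parse_ini_line_alt (line : String) : List String :=
  if PySem.Str.find line "'" > 0 ∨ PySem.Str.find line "\"" > 0 then
    let st := line.toList.foldl pvStepB ([], [], none, false)
    let (fields, tok, _, _) := st
    ((if tok ≠ [] then fields ++ [tok] else fields)).map String.mk
  else if PySem.Str.find line "\t" > 0 then
    (PySem.Str.split? line "\t").getD []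
  else
    PySem.Str.split₀ line

-- ===== PRECONDITION & SPEC =====
def Spec_parse_ini_line (line : String) (out : List String) : Prop := out = parse_ini_line_alt line
instance (line : String) (out : List String) : Decidable (Spec_parse_ini_line line out) := by unfold Spec_parse_ini_line; infer_instance

-- ===== CLAIM (what is proved, stated in full; the proofs are below) =====
def Claim_equal_parse_ini_line : Prop := ∀ (line : String), Dom_parse_ini_line line → Spec_parse_ini_line line (parse_ini_line line)

-- ===== LEMMAS AND PROOFS =====

-- the characters A's loop appends to c2, starting from state (escape, quote)
def pvEmit : Bool → Option Char → List Char → List Char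
  | _, _, [] => []
  | escape, quote, c :: rest =>
    if c = '\\' then
      if escape then '\\' :: pvEmit false quote rest else pvEmit true quote rest
    else if (c = '"' ∨ c = '\'') ∧ quote = none then pvEmit escape (some c) rest
    else if (c = '"' ∨ c = '\'') ∧ quote = some c then pvEmit escape none rest
    else (if PySem.Chars.isspace c ∧ quote.isSome then Char.ofNat 0 else c) :: pvEmit escape quote rest

def pvSub (c : Char) : Char := if c = Char.ofNat 0 then ' ' else c

lemma pvFoldA_eq_emit (cs : List Char) : ∀ (e : Bool) (q : Option Char) (c2 : List Char),
    (cs.foldl pvStepA (e, q, c2)).2.2 = c2 ++ pvEmit e q cs := by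
  induction cs with
  | nil => intro e q c2; simp [pvEmit]
  | cons c rest ih =>
    intro e q c2
    simp only [List.foldl_cons, pvStepA, pvEmit]
    split_ifs <;> simp [ih, *]

lemma pvReplaceGo_sub (fuel : Nat) : ∀ (l acc : List Char), l.length ≤ fuel →
    PySem.Chars.replace.go [Char.ofNat 0] [' '] fuel l acc = acc.reverse ++ l.map pvSub := by
  induction fuel with
  | zero =>
    intro l acc h
    have : l = [] := List.eq_nil_of_length_eq_zero (Nat.le_zero.mp h)
    subst this; simp [PySem.Chars.replace.go]
  | succ n ih =>
    intro l acc h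
    cases l with
    | nil => simp [PySem.Chars.replace.go]
    | cons c t =>
      by_cases hc : c = Char.ofNat 0
      · subst hc
        rw [show PySem.Chars.replace.go [Char.ofNat 0] [' '] (n+1) (Char.ofNat 0 :: t) acc
            = PySem.Chars.replace.go [Char.ofNat 0] [' '] n t (' ' :: acc) from by
          simp [PySem.Chars.replace.go, List.isPrefixOf]]
        rw [ih t (' ' :: acc) (by simpa using Nat.le_of_succ_le_succ h)]
        simp [pvSub]
      · rw [show PySem.Chars.replace.go [Char.ofNat 0] [' '] (n+1) (c :: t) acc
            = PySem.Chars.replace.go [Char.ofNat 0] [' '] n t (c :: acc) from by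
          simp [PySem.Chars.replace.go, List.isPrefixOf, Ne.symm hc]]
        rw [ih t (c :: acc) (by simpa using Nat.le_of_succ_le_succ h)]
        simp [pvSub, hc]

lemma pvReplace_sub (f : List Char) :
    PySem.Chars.replace f [Char.ofNat 0] [' '] = f.map pvSub := by
  simp only [PySem.Chars.replace]
  rw [if_neg (by simp)]
  simpa using pvReplaceGo_sub f.length f [] le_rfl

-- main fusion: B's fold computes the mapped tokenization of A's emitted marker string
lemma pvMain (cs : List Char) : ∀ (e : Bool) (q : Option Char) (acc : List (List Char)) (cur : List Char),
    (∀ c ∈ cs, c ≠ Char.ofNat 0) →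
    (match cs.foldl pvStepB (acc.reverse.map (·.map pvSub), cur.reverse.map pvSub, q, e) with
     | (fields, tok, _, _) => if tok ≠ [] then fields ++ [tok] else fields)
    = (PySem.Chars.split₀.go (pvEmit e q cs) cur acc).map (·.map pvSub) := by
  induction cs with
  | nil =>
    intro e q acc cur _
    by_cases hcur : cur = []
    · subst hcur; simp [pvEmit, PySem.Chars.split₀.go]
    · simp [pvEmit, PySem.Chars.split₀.go, List.isEmpty_iff, hcur]
  | cons c rest ih =>
    intro e q acc cur hnul
    have hcnul : c ≠ Char.ofNat 0 := hnul c (List.mem_cons_self ..)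
    have hrest : ∀ x ∈ rest, x ≠ Char.ofNat 0 := fun x hx => hnul x (List.mem_cons_of_mem _ hx)
    simp only [List.foldl_cons, pvStepB, pvEmit]
    by_cases h1 : c = '\\'
    · subst h1
      cases e with
      | false =>
        simp only [reduceIte]
        exact ih true q acc cur hrest
      | true =>
        simp only [reduceIte]
        rw [show (List.map pvSub cur.reverse) ++ ['\\'] = List.map pvSub ('\\' :: cur).reverse from by
              simp [pvSub],
            show PySem.Chars.split₀.go ('\\' :: pvEmit false q rest) cur acc
              = PySem.Chars.split₀.go (pvEmit false q rest) ('\\' :: cur) acc from by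
              simp [PySem.Chars.split₀.go, PySem.Chars.isspace]]
        exact ih false q acc ('\\' :: cur) hrest
    · rw [if_neg h1, if_neg h1]
      by_cases h2 : (c = '"' ∨ c = '\'') ∧ (q = none ∨ q = some c)
      · rw [if_pos h2]
        rcases h2 with ⟨hcq, hq⟩
        by_cases hqc : q = some c
        · rw [if_pos (show q = some c from hqc),
              if_neg (show ¬ ((c = '"' ∨ c = '\'') ∧ q = none) from by simp [hqc]),
              if_pos (show (c = '"' ∨ c = '\'') ∧ q = some c from ⟨hcq, hqc⟩)]
          exact ih e none acc cur hrest
        · have hqn : q = none := hq.resolve_right hqc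
          subst hqn
          rw [if_neg (show ¬ ((none : Option Char) = some c) from by simp),
              if_pos (show (c = '"' ∨ c = '\'') ∧ (none : Option Char) = none from ⟨hcq, rfl⟩)]
          exact ih e (some c) acc cur hrest
      · rw [if_neg h2,
            if_neg (show ¬ ((c = '"' ∨ c = '\'') ∧ q = none) from fun h3 => h2 ⟨h3.1, Or.inl h3.2⟩),
            if_neg (show ¬ ((c = '"' ∨ c = '\'') ∧ q = some c) from fun h4 => h2 ⟨h4.1, Or.inr h4.2⟩)]
        by_cases h5 : PySem.Chars.isspace c = true ∧ q = none
        · obtain ⟨hsp, hqn⟩ := h5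
          subst hqn
          rw [if_pos (show PySem.Chars.isspace c = true ∧ (none : Option Char) = none from ⟨hsp, rfl⟩),
              if_neg (show ¬ (PySem.Chars.isspace c = true ∧ (none : Option Char).isSome = true) from by
                simp),
              show PySem.Chars.split₀.go (c :: pvEmit e none rest) cur acc
                = if cur.isEmpty then PySem.Chars.split₀.go (pvEmit e none rest) [] acc
                  else PySem.Chars.split₀.go (pvEmit e none rest) [] (cur.reverse :: acc) from by
                simp [PySem.Chars.split₀.go, hsp]]
          by_cases hcur : cur = []
          · subst hcur
            simp only [List.isEmpty_nil, if_true, List.reverse_nil, List.map_nil, ne_eq]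
            simpa using ih e none acc [] hrest
          · rw [show cur.isEmpty = false from by simpa [List.isEmpty_iff] using hcur]
            simp only [Bool.false_eq_true, if_false]
            have h6 := ih e none (cur.reverse :: acc) [] hrest
            simp only [List.reverse_cons, List.map_append, List.map_nil, List.map_cons,
              List.reverse_nil] at h6 ⊢
            rw [← h6]
            simp [hcur]
        · rw [if_neg h5]
          rcases hq : q with _ | qc
          · have hsp : ¬ PySem.Chars.isspace c = true := fun h => h5 ⟨h, hq⟩
            rw [if_neg (show ¬ ((none : Option Char).isSome = true ∧ PySem.Chars.isspace c = true) from
                  fun h => hsp h.2),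
                if_neg (show ¬ (PySem.Chars.isspace c = true ∧ (none : Option Char).isSome = true) from
                  fun h => hsp h.1),
                show (List.map pvSub cur.reverse) ++ [c] = List.map pvSub (c :: cur).reverse from by
                  simp [pvSub, hcnul],
                show PySem.Chars.split₀.go (c :: pvEmit e none rest) cur acc
                  = PySem.Chars.split₀.go (pvEmit e none rest) (c :: cur) acc from by
                  simp [PySem.Chars.split₀.go, hsp]]
            exact ih e none acc (c :: cur) hrest
          · by_cases hsp : PySem.Chars.isspace c = true
            · rw [if_pos (show (some qc).isSome = true ∧ PySem.Chars.isspace c = true from ⟨rfl, hsp⟩),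
                  if_pos (show PySem.Chars.isspace c = true ∧ (some qc).isSome = true from ⟨hsp, rfl⟩),
                  show (List.map pvSub cur.reverse) ++ [' '] = List.map pvSub (Char.ofNat 0 :: cur).reverse from by
                    simp [pvSub],
                  show PySem.Chars.split₀.go (Char.ofNat 0 :: pvEmit e (some qc) rest) cur acc
                    = PySem.Chars.split₀.go (pvEmit e (some qc) rest) (Char.ofNat 0 :: cur) acc from by
                    simp [PySem.Chars.split₀.go, PySem.Chars.isspace]]
              exact ih e (some qc) acc (Char.ofNat 0 :: cur) hrest
            · rw [if_neg (show ¬ ((some qc).isSome = true ∧ PySem.Chars.isspace c = true) from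
                    fun h => hsp h.2),
                  if_neg (show ¬ (PySem.Chars.isspace c = true ∧ (some qc).isSome = true) from
                    fun h => hsp h.1),
                  show (List.map pvSub cur.reverse) ++ [c] = List.map pvSub (c :: cur).reverse from by
                    simp [pvSub, hcnul],
                  show PySem.Chars.split₀.go (c :: pvEmit e (some qc) rest) cur acc
                    = PySem.Chars.split₀.go (pvEmit e (some qc) rest) (c :: cur) acc from by
                    simp [PySem.Chars.split₀.go, hsp]]
              exact ih e (some qc) acc (c :: cur) hrest

-- ===== VERDICT (by name: the statement is the Claim_ definition above) =====
theorem parse_ini_line_spec : Claim_equal_parse_ini_line := by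
  intro line hdom
  unfold Spec_parse_ini_line parse_ini_line parse_ini_line_alt
  by_cases hg : PySem.Str.find line "'" > 0 ∨ PySem.Str.find line "\"" > 0
  · rw [if_pos hg, if_pos hg]
    have hnul : ∀ c ∈ line.toList, c ≠ Char.ofNat 0 := by
      intro c hc
      have := List.all_eq_true.mp hdom c hc
      intro h; subst h
      simp [pvDomChar] at this
    have hA := pvFoldA_eq_emit line.toList false none []
    have hB := pvMain line.toList false none [] [] hnul
    simp only [List.nil_append] at hA
    simp only [List.reverse_nil, List.map_nil] at hB
    simp only [hA, PySem.Chars.split₀]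
    rcases hfold : line.toList.foldl pvStepB ([], [], none, false) with ⟨fields, tok, qq, ee⟩
    rw [hfold] at hB
    simp only at hB
    rw [show (if (fields, tok, qq, ee).2.1 ≠ [] then (fields, tok, qq, ee).1 ++ [(fields, tok, qq, ee).2.1]
          else (fields, tok, qq, ee).1) = (if tok ≠ [] then fields ++ [tok] else fields) from rfl,
        hB]
    simp [pvReplace_sub]
  · rw [if_neg hg, if_neg hg]
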